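-- pv_equiv track=rewrite | github.com/centenohugo/Project-Barcelona | src/build_fluency.py | _sentence_positions
-- ===== SOURCE A (Python) =====
-- def _sentence_positions(words: list[dict]) -> list[str]:
--     n = len(words)
--     positions = ["middle"] * n
--     for i, w in enumerate(words):
--         sid      = w["sentence_id"]
--         is_first = (i == 0) or (words[i - 1]["sentence_id"] != sid)
--         is_last  = (i == n - 1) or (words[i + 1]["sentence_id"] != sid)
--         if is_first:
--             positions[i] = "initial"
--         elif is_last:
--             positions[i] = "final"
--     return positions
-- ===== SOURCE B (Python) =====
-- def _sentence_positions(words: list[dict]) -> list[str]: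
--     # Group-then-label: split the sentence ids into maximal runs, emit each
--     # run's labels in one go ("initial", middles, "final"; a 1-run is "initial").
--     sids = [w["sentence_id"] for w in words]
--     out = []
--     i, n = 0, len(sids)
--     while i < n:
--         j = i + 1
--         while j < n and sids[j] == sids[i]:
--             j += 1
--         k = j - i
--         if k == 1:
--             out.append("initial")
--         else:
--             out += ["initial"] + ["middle"] * (k - 2) + ["final"]
--         i = j
--     return out
-- ===== Notes on version B (the rewrite author's own statement) =====
-- stated objective: alternative
-- what changed: B replaces A's per-index neighbor comparisons (looking at words[i-1] and words[i+1] for every i) with a group-then-label pass: it splits the sentence ids into maximal runs of equal id and emits each run's labels ('initial', middles, 'final'; a length-1 run is 'initial') in one block.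
import Mathlib
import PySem

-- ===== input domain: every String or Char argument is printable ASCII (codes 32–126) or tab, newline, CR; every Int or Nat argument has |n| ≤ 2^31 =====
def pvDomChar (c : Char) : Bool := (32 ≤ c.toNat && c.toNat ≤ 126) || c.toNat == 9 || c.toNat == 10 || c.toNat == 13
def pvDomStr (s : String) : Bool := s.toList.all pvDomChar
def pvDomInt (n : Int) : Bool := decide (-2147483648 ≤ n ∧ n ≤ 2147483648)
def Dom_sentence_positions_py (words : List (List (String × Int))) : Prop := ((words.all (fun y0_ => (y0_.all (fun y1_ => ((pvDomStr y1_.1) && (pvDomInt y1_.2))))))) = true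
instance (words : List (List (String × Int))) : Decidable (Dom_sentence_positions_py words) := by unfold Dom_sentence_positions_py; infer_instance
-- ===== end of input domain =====

-- B labels words by first grouping them into maximal runs of equal sentence_id and
-- emitting each run's labels in one block (objective: alternative decomposition, not faster).

-- ===== PORT A =====
-- w["sentence_id"] is ported as (Dict.get? …).getD 0; Pre_ excludes the KeyError inputs,
-- so inside Pre_ this is exact.
def sentence_positions_py (words : List (List (String × Int))) : List String :=
  let n : Int := (words.length : Int)
  let positions : List String := List.replicate words.length "middle"
  (PySem.List.enumerate words 0).foldl (fun pos iw =>
    let i : Int := iw.1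
    let w := iw.2
    let sid : Int := ((w.find? (fun p => p.1 == "sentence_id")).map (·.2)).getD 0
    let is_first : Bool := (i == 0) ||
      ((((PySem.List.pyGetD words (i - 1) []).find? (fun p => p.1 == "sentence_id")).map (·.2)).getD 0 != sid)
    let is_last : Bool := (i == n - 1) ||
      ((((PySem.List.pyGetD words (i + 1) []).find? (fun p => p.1 == "sentence_id")).map (·.2)).getD 0 != sid)
    if is_first then PySem.List.pySetD pos i "initial"
    else if is_last then PySem.List.pySetD pos i "final"
    else pos) positions

-- ===== PORT B =====
def pvSidOf (w : List (String × Int)) : Int := ((w.find? (fun p => p.1 == "sentence_id")).map (·.2)).getD 0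

-- inner while loop of Source B: length of the run of sids equal to s at the front of the list
def pvRunLen (s : Int) : List Int → Nat
  | [] => 0
  | t :: rest => if t == s then 1 + pvRunLen s rest else 0

-- outer while loop of Source B: emit one run's labels, recurse on the remainder
def pvLabelRuns : List Int → List String
  | [] => []
  | s :: rest =>
    let m := pvRunLen s rest
    (if m = 0 then ["initial"] else "initial" :: (List.replicate (m - 1) "middle" ++ ["final"]))
      ++ pvLabelRuns (rest.drop m)
  termination_by l => l.length
  decreasing_by simp

def sentence_positions_py_alt (words : List (List (String × Int))) : List String :=
  pvLabelRuns (words.map pvSidOf)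

-- ===== PRECONDITION & SPEC =====
-- Pre_ excludes inputs where some word dict lacks the "sentence_id" key, on which A raises KeyError.
def Pre_sentence_positions_py (words : List (List (String × Int))) : Prop :=
  (words.all (fun w => (w.find? (fun p => p.1 == "sentence_id")).isSome)) = true
instance (words : List (List (String × Int))) : Decidable (Pre_sentence_positions_py words) := by
  unfold Pre_sentence_positions_py; infer_instance

def pvWitness_sentence_positions_py : (List (List (String × Int))) :=
  [[("sentence_id", 1)], [("sentence_id", 1)], [("sentence_id", 2)]]

def Spec_sentence_positions_py (words : List (List (String × Int))) (out : List String) : Prop := out = sentence_positions_py_alt words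
instance (words : List (List (String × Int))) (out : List String) : Decidable (Spec_sentence_positions_py words out) := by unfold Spec_sentence_positions_py; infer_instance

-- ===== CLAIM (what is proved, stated in full; the proofs are below) =====
def Claim_equal_sentence_positions_py : Prop := ∀ (words : List (List (String × Int))), Dom_sentence_positions_py words → Pre_sentence_positions_py words → Spec_sentence_positions_py words (sentence_positions_py words)

-- ===== LEMMAS AND PROOFS =====

-- reference labeling: one pass with the previous sid as state
def pvLab (prev : Option Int) : List Int → List String
  | [] => []
  | s :: rest =>
    (if prev ≠ some s then "initial"
     else if rest.head? ≠ some s then "final" else "middle") :: pvLab (some s) rest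

-- reference labeling by index (A's view)
def pvLabIdx (sids : List Int) (j : Nat) : String :=
  if j = 0 ∨ sids.getD (j - 1) 0 ≠ sids.getD j 0 then "initial"
  else if j = sids.length - 1 ∨ sids.getD (j + 1) 0 ≠ sids.getD j 0 then "final" else "middle"

lemma pvLab_length (prev : Option Int) (l : List Int) : (pvLab prev l).length = l.length := by
  induction l generalizing prev with
  | nil => simp [pvLab]
  | cons s rest ih => simp [pvLab, ih]

lemma pvLab_getElem? (l : List Int) (prev : Option Int) (j : Nat) (hj : j < l.length) :
    (pvLab prev l)[j]? =
      some (if (if j = 0 then prev else some (l.getD (j - 1) 0)) ≠ some (l.getD j 0) then "initial"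
            else if l[j + 1]? ≠ some (l.getD j 0) then "final" else "middle") := by
  induction l generalizing prev j with
  | nil => simp at hj
  | cons s rest ih =>
    cases j with
    | zero => simp [pvLab, List.head?_eq_getElem?]
    | succ j =>
      have hj' : j < rest.length := by simpa using hj
      have := ih (some s) j hj'
      simp only [pvLab, List.getElem?_cons_succ, this]
      cases j with
      | zero => simp
      | succ j' => simp

lemma pvLab_getElem?_eq_labIdx (l : List Int) (j : Nat) (hj : j < l.length) :
    (pvLab none l)[j]? = some (pvLabIdx l j) := by
  rw [pvLab_getElem? l none j hj, pvLabIdx]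
  congr 1
  by_cases h0 : j = 0
  · subst h0
    simp
  · rw [if_neg h0]
    have hfirst : (some (l.getD (j - 1) 0) ≠ some (l.getD j 0)) ↔ (j = 0 ∨ l.getD (j - 1) 0 ≠ l.getD j 0) := by
      constructor
      · intro h; right; simpa using h
      · intro h; rcases h with h | h
        · exact absurd h h0
        · simpa using h
    have hlast : (l[j + 1]? ≠ some (l.getD j 0)) ↔ (j = l.length - 1 ∨ l.getD (j + 1) 0 ≠ l.getD j 0) := by
      by_cases hj1 : j + 1 < l.length
      · rw [List.getElem?_eq_getElem hj1]
        have : l.getD (j + 1) 0 = l[j + 1] := List.getD_eq_getElem l 0 hj1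
        constructor
        · intro h; right; rw [this]; simpa using h
        · intro h; rcases h with h | h
          · omega
          · rw [this] at h; simpa using h
      · have hje : j = l.length - 1 := by omega
        rw [List.getElem?_eq_none (by omega)]
        simp [hje]
    by_cases hf : j = 0 ∨ l.getD (j - 1) 0 ≠ l.getD j 0
    · rw [if_pos (hfirst.mpr hf), if_pos hf]
    · rw [if_neg (fun h => hf (hfirst.mp h)), if_neg hf]
      by_cases hl : j = l.length - 1 ∨ l.getD (j + 1) 0 ≠ l.getD j 0
      · rw [if_pos (hlast.mpr hl), if_pos hl]
      · rw [if_neg (fun h => hl (hlast.mp h)), if_neg hl]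

-- ===== B side =====

lemma pvLab_cons_ne (p : Option Int) (s : Int) (rest : List Int) (h : p ≠ some s) :
    pvLab p (s :: rest) = pvLab none (s :: rest) := by
  simp [pvLab, h]

lemma pvLab_none_of_head_ne (s : Int) (l : List Int) (h : l.head? ≠ some s) :
    pvLab (some s) l = pvLab none l := by
  cases l with
  | nil => rfl
  | cons t rest =>
    apply pvLab_cons_ne
    simp only [List.head?_cons] at h
    simpa using fun he => h (by rw [he])

lemma pvLab_run (m : Nat) (s : Int) (rest : List Int) (h : rest.head? ≠ some s) :
    pvLab (some s) (List.replicate m s ++ rest) =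
      (List.replicate (m - 1) "middle" ++ if m = 0 then [] else ["final"]) ++ pvLab none rest := by
  induction m with
  | zero => simpa using pvLab_none_of_head_ne s rest h
  | succ m ih =>
    rw [List.replicate_succ, List.cons_append]
    rw [show pvLab (some s) (s :: (List.replicate m s ++ rest)) =
        (if (List.replicate m s ++ rest).head? ≠ some s then "final" else "middle")
          :: pvLab (some s) (List.replicate m s ++ rest) by simp [pvLab]]
    rw [ih]
    cases m with
    | zero => simp [h]
    | succ m' => simp [List.replicate_succ]

lemma pvRunLen_spec (s : Int) (l : List Int) :
    l = List.replicate (pvRunLen s l) s ++ l.drop (pvRunLen s l) ∧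
      (l.drop (pvRunLen s l)).head? ≠ some s := by
  induction l with
  | nil => simp [pvRunLen]
  | cons t rest ih =>
    by_cases ht : t = s
    · subst ht
      have hr : pvRunLen t (t :: rest) = pvRunLen t rest + 1 := by
        simp [pvRunLen]; omega
      rw [hr]
      refine ⟨?_, ?_⟩
      · rw [List.replicate_succ, List.cons_append, List.drop_succ_cons]
        exact congrArg _ ih.1
      · rw [List.drop_succ_cons]
        exact ih.2
    · simp [pvRunLen, ht]

lemma pvLabelRuns_eq_lab_aux : ∀ (n : Nat) (l : List Int), l.length ≤ n → pvLabelRuns l = pvLab none l := by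
  intro n
  induction n with
  | zero =>
    intro l h
    have hl : l = [] := List.eq_nil_of_length_eq_zero (by omega)
    subst hl
    rw [pvLabelRuns]
    rfl
  | succ n ih =>
    intro l h
    cases l with
    | nil => rw [pvLabelRuns]; rfl
    | cons s rest =>
      have hdl : (rest.drop (pvRunLen s rest)).length ≤ n := by
        simp only [List.length_cons] at h
        simp only [List.length_drop]
        omega
      have ihd := ih (rest.drop (pvRunLen s rest)) hdl
      have hspec := pvRunLen_spec s rest
      have hlab : pvLab none (s :: rest) = "initial" :: pvLab (some s) rest := by simp [pvLab]
      rw [pvLabelRuns]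
      rw [hlab]
      conv_rhs => rw [show rest = List.replicate (pvRunLen s rest) s ++ rest.drop (pvRunLen s rest) from hspec.1]
      rw [pvLab_run _ _ _ hspec.2, ← ihd]
      by_cases h0 : pvRunLen s rest = 0
      · simp [h0]
      · rw [if_neg h0, if_neg h0]
        simp

lemma pvLabelRuns_eq_lab (l : List Int) : pvLabelRuns l = pvLab none l :=
  pvLabelRuns_eq_lab_aux l.length l le_rfl

-- ===== A side =====

lemma pvSid_getD (words : List (List (String × Int))) (m : Nat) :
    (words.map pvSidOf).getD m 0 = pvSidOf (words.getD m []) := by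
  by_cases hm : m < words.length
  · rw [List.getD_eq_getElem _ _ (by simpa using hm), List.getD_eq_getElem _ _ hm]
    simp
  · rw [List.getD_eq_default _ _ (by simpa using Nat.le_of_not_lt hm),
        List.getD_eq_default _ _ (Nat.le_of_not_lt hm)]
    simp [pvSidOf]

-- the step function of port A, named for the proofs
def pvStepA (words : List (List (String × Int))) (pos : List String) (iw : Int × List (String × Int)) : List String :=
  let i : Int := iw.1
  let w := iw.2
  let sid : Int := ((w.find? (fun p => p.1 == "sentence_id")).map (·.2)).getD 0
  let is_first : Bool := (i == 0) ||
    ((((PySem.List.pyGetD words (i - 1) []).find? (fun p => p.1 == "sentence_id")).map (·.2)).getD 0 != sid)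
  let is_last : Bool := (i == (words.length : Int) - 1) ||
    ((((PySem.List.pyGetD words (i + 1) []).find? (fun p => p.1 == "sentence_id")).map (·.2)).getD 0 != sid)
  if is_first then PySem.List.pySetD pos i "initial"
  else if is_last then PySem.List.pySetD pos i "final"
  else pos

lemma pvPortA_eq_foldl (words : List (List (String × Int))) :
    sentence_positions_py words =
      (PySem.List.enumerate words 0).foldl (pvStepA words) (List.replicate words.length "middle") := rfl

-- one step sets index k to pvLabIdx (for k < n, w = words[k], pos[k] = "middle")
lemma pvStepA_char (words : List (List (String × Int))) (pos : List String) (k : Nat)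
    (hk : k < words.length) (hpos : pos[k]? = some "middle") :
    pvStepA words pos ((k : Int), words[k]) = pos.set k (pvLabIdx (words.map pvSidOf) k) := by
  have hsid : ((words[k].find? (fun p => p.1 == "sentence_id")).map (·.2)).getD 0
      = (words.map pvSidOf).getD k 0 := by
    rw [pvSid_getD, List.getD_eq_getElem _ _ hk]
    rfl
  have hlen : (words.map pvSidOf).length = words.length := by simp
  have hnext : (((PySem.List.pyGetD words ((k : Int) + 1) []).find? (fun p => p.1 == "sentence_id")).map (·.2)).getD 0
      = (words.map pvSidOf).getD (k + 1) 0 := by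
    rw [show (k : Int) + 1 = ((k + 1 : Nat) : Int) by omega, PySem.List.pyGetD_natCast, pvSid_getD]
    rfl
  have hposmid : pos = pos.set k "middle" := by
    have hkl : k < pos.length := by
      by_contra hcon
      rw [List.getElem?_eq_none (by omega)] at hpos
      exact absurd hpos (by simp)
    apply List.ext_getElem?
    intro j
    by_cases hjk : j = k
    · subst hjk
      rw [List.getElem?_set_self hkl, hpos]
    · rw [List.getElem?_set_ne (by omega)]
  unfold pvStepA pvLabIdx
  simp only [hsid, hnext, hlen]
  by_cases h0 : k = 0
  · have hc0 : ((k : Int) == 0) = true := by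
      simp only [beq_iff_eq]
      omega
    rw [if_pos (by rw [hc0]; rw [Bool.true_or]), if_pos (Or.inl h0), PySem.List.pySetD_natCast]
  · have hprev : (((PySem.List.pyGetD words ((k : Int) - 1) []).find? (fun p => p.1 == "sentence_id")).map (·.2)).getD 0
        = (words.map pvSidOf).getD (k - 1) 0 := by
      rw [show (k : Int) - 1 = ((k - 1 : Nat) : Int) by omega, PySem.List.pyGetD_natCast, pvSid_getD]
      rfl
    simp only [hprev]
    have hk0 : ((k : Int) == 0) = false := by
      simp only [beq_eq_false_iff_ne, ne_eq]
      omega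
    by_cases hfst : (words.map pvSidOf).getD (k - 1) 0 = (words.map pvSidOf).getD k 0
    · have hb1 : (((k : Int) == 0) || ((words.map pvSidOf).getD (k - 1) 0 != (words.map pvSidOf).getD k 0)) = false := by
        rw [hfst, hk0]
        simp
      rw [if_neg (by rw [hb1]; exact Bool.false_ne_true), if_neg (not_or.mpr ⟨h0, fun hne => hne hfst⟩)]
      by_cases hl2 : (words.map pvSidOf).getD (k + 1) 0 = (words.map pvSidOf).getD k 0
      · by_cases hl1 : k = words.length - 1
        · have hc : ((k : Int) == (words.length : Int) - 1) = true := by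
            simp only [beq_iff_eq]
            omega
          rw [if_pos (by rw [hc]; rw [Bool.true_or]), if_pos (Or.inl hl1), PySem.List.pySetD_natCast]
        · have hc : ((k : Int) == (words.length : Int) - 1) = false := by
            simp only [beq_eq_false_iff_ne, ne_eq]
            omega
          have hb2 : (((k : Int) == (words.length : Int) - 1) || ((words.map pvSidOf).getD (k + 1) 0 != (words.map pvSidOf).getD k 0)) = false := by
            rw [hl2, hc]
            simp
          rw [if_neg (by rw [hb2]; exact Bool.false_ne_true), if_neg (not_or.mpr ⟨hl1, fun hne => hne hl2⟩)]
          exact hposmid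
      · have hb2 : (((k : Int) == (words.length : Int) - 1) || ((words.map pvSidOf).getD (k + 1) 0 != (words.map pvSidOf).getD k 0)) = true := by
          rw [Bool.or_eq_true]
          right
          exact bne_iff_ne.mpr hl2
        rw [if_pos hb2, if_pos (Or.inr hl2), PySem.List.pySetD_natCast]
    · have hb1 : (((k : Int) == 0) || ((words.map pvSidOf).getD (k - 1) 0 != (words.map pvSidOf).getD k 0)) = true := by
        rw [Bool.or_eq_true]
        right
        exact bne_iff_ne.mpr hfst
      rw [if_pos hb1, if_pos (Or.inr hfst), PySem.List.pySetD_natCast]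

-- main A-side invariant
lemma pvFoldA (words : List (List (String × Int))) :
    ∀ (l : List (List (String × Int))) (k : Nat) (pos : List String),
      l = words.drop k → pos.length = words.length →
      (∀ j, k ≤ j → j < words.length → pos[j]? = some "middle") →
      ((PySem.List.enumerate l (k : Int)).foldl (pvStepA words) pos).length = words.length ∧
      ∀ j, j < words.length →
        ((PySem.List.enumerate l (k : Int)).foldl (pvStepA words) pos)[j]? =
          if j < k then pos[j]? else some (pvLabIdx (words.map pvSidOf) j) := by
  intro l
  induction l with
  | nil =>
    intro k pos hdrop hlen hmid
    have hk : words.length ≤ k := by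
      by_contra h
      have := congrArg List.length hdrop
      simp at this; omega
    refine ⟨by simpa [PySem.List.enumerate] using hlen, ?_⟩
    intro j hj
    rw [if_pos (by omega)]
    simp [PySem.List.enumerate]
  | cons w l' ih =>
    intro k pos hdrop hlen hmid
    have hk : k < words.length := by
      by_contra h
      rw [List.drop_eq_nil_of_le (by omega)] at hdrop
      exact absurd hdrop (by simp)
    have hw : w = words[k] := by
      have h0' := congrArg (fun t => t[0]?) hdrop
      simp only [List.getElem?_cons_zero, List.getElem?_drop, Nat.add_zero] at h0'
      rw [List.getElem?_eq_getElem hk] at h0'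
      exact Option.some.inj h0'
    have hl' : l' = words.drop (k + 1) := by
      have ht := congrArg List.tail hdrop
      simpa [List.tail_drop] using ht
    rw [PySem.List.enumerate_cons, List.foldl_cons]
    have hstep : pvStepA words pos ((k : Int), w) = pos.set k (pvLabIdx (words.map pvSidOf) k) := by
      rw [hw]; exact pvStepA_char words pos k hk (hmid k le_rfl hk)
    rw [hstep]
    have hrec := ih (k + 1) (pos.set k (pvLabIdx (words.map pvSidOf) k))
      hl' (by simpa using hlen)
      (by
        intro j hj1 hj2
        rw [List.getElem?_set_ne (by omega)]
        exact hmid j (by omega) hj2)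
    rw [show ((k : Int) + 1) = ((k + 1 : Nat) : Int) by omega]
    refine ⟨hrec.1, ?_⟩
    intro j hj
    rw [hrec.2 j hj]
    by_cases hjk : j < k
    · rw [if_pos (by omega), if_pos hjk, List.getElem?_set_ne (by omega)]
    · by_cases hjk' : j = k
      · subst hjk'
        rw [if_pos (by omega), if_neg (by omega),
            List.getElem?_set_self (by omega)]
      · rw [if_neg (by omega), if_neg (by omega)]

-- ===== VERDICT (by name: the statement is the Claim_ definition above) =====
theorem sentence_positions_py_spec : Claim_equal_sentence_positions_py := by
  intro words _ _
  unfold Spec_sentence_positions_py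
  rw [pvPortA_eq_foldl]
  have h := pvFoldA words words 0 (List.replicate words.length "middle") (by simp)
    (by simp) (by intro j _ hj; simp [hj])
  simp only [Nat.cast_zero] at h
  unfold sentence_positions_py_alt
  rw [pvLabelRuns_eq_lab]
  apply List.ext_getElem?
  intro j
  by_cases hj : j < words.length
  · rw [h.2 j hj, if_neg (by omega), pvLab_getElem?_eq_labIdx _ j (by simpa using hj)]
  · rw [List.getElem?_eq_none (by omega), List.getElem?_eq_none (by rw [pvLab_length]; simpa using Nat.le_of_not_lt hj)]
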